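-- pv_equiv track=rewrite | github.com/HBinhCT/Q-project | hackerearth/Data Structures/Advanced Data Structures/Fenwick (Binary Indexed) Trees/A sorted string/solution.py | solve
-- ===== SOURCE A (Python) =====
-- def solve(n, s):
--     # Write your code here
--     def query(array, idx):
--         total = 0
--         while idx > 0:
--             total += array[idx]
--             idx -= idx & -idx
--         return total
--
--     def update(array, idx):
--         while idx < len(array):
--             array[idx] += 1
--             idx += idx & -idx
--
--     chars = {'a': 1, 'b': 0, 'c': -1}
--     fx = [0] * n
--     for i in range(n):
--         fx[i] = fx[i - 1] + chars[s[i]]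
--     start = n + 1
--     tree = [0] * (2 * n + 4)
--     res = 0
--     update(tree, start)
--     for i in range(n):
--         j = start + fx[i]
--         update(tree, j)
--         res += query(tree, j - 1)
--         res %= 1000000007
--     return res
-- ===== SOURCE B (Python) =====
-- def solve(n, s):
--     # Write your code here
--     delta = {'a': 1, 'b': 0, 'c': -1}
--     freq = [0] * (2 * n + 1)   # freq[v + n] = how many prefix values equal v
--     freq[n] = 1                # the empty prefix has value 0
--     v = 0                      # current prefix value
--     less = 0                   # number of stored prefix values < v
--     res = 0
--     for i in range(n):
--         d = delta[s[i]]
--         if d == 1: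
--             less += freq[v + n]
--             v += 1
--         elif d == -1:
--             v -= 1
--             less -= freq[v + n]
--         res = (res + less) % 1000000007
--         freq[v + n] += 1
--     return res
-- ===== Notes on version B (the rewrite author's own statement) =====
-- stated objective: faster
-- what changed: Replaces the Fenwick (binary indexed) tree with an O(1)-per-step incremental count: since consecutive prefix sums differ by -1, 0 or +1, a plain frequency array plus a running 'number of earlier prefix values below the current one' counter replaces every O(log n) tree query/update.
import Mathlib
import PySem

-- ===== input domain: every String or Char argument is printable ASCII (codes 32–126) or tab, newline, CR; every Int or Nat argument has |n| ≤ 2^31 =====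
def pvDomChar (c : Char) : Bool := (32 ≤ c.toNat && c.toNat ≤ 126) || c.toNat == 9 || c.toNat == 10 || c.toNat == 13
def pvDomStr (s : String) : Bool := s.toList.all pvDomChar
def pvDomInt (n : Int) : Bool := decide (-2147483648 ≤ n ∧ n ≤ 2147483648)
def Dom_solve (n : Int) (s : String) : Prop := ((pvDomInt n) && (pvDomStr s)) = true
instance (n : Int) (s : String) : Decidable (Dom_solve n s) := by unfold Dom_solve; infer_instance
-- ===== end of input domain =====

-- B replaces A's Fenwick tree with an O(1)-per-step frequency-array counter (prefix sums move by ±1), an asymptotically faster algorithm.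

-- ===== PORT A =====
-- idx & -idx  (Python bitwise AND, exact on negatives)
def lowbitI (idx : Int) : Int := PySem.Int.band idx (-idx)

-- 'while idx > 0: total += array[idx]; idx -= idx & -idx' — fuel bounds the iteration count
def queryGo (a : List Int) (total idx : Int) : Nat → Int
  | 0 => total
  | fuel+1 =>
    if 0 < idx then
      queryGo a (total + PySem.List.pyGetD a idx 0) (idx - lowbitI idx) fuel
    else total

def queryA (a : List Int) (idx : Int) : Int := queryGo a 0 idx idx.toNat

-- 'while idx < len(array): array[idx] += 1; idx += idx & -idx'
def updateGo (a : List Int) (idx : Int) : Nat → List Int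
  | 0 => a
  | fuel+1 =>
    if idx < PySem.List.len a then
      updateGo (PySem.List.pySetD a idx (PySem.List.pyGetD a idx 0 + 1)) (idx + lowbitI idx) fuel
    else a

def updateA (a : List Int) (idx : Int) : List Int :=
  updateGo a idx (PySem.List.len a - idx).toNat

def charsDictA : PySem.Dict Char Int :=
  ((PySem.Dict.empty.insert 'a' 1).insert 'b' 0).insert 'c' (-1)

def solve (n : Int) (s : String) : Int :=
  let fx0 : List Int := List.replicate n.toNat 0
  let fx : List Int := (PySem.List.pyRange 0 n 1).foldl
    (fun fx i =>
      PySem.List.pySetD fx i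
        (PySem.List.pyGetD fx (i - 1) 0 +
          PySem.Dict.getD charsDictA (PySem.List.pyGetD s.toList i ' ') 0)) fx0
  let start := n + 1
  let tree0 : List Int := List.replicate (2 * n + 4).toNat 0
  let tree1 := updateA tree0 start
  let fin : List Int × Int := (PySem.List.pyRange 0 n 1).foldl
    (fun st i =>
      let j := start + PySem.List.pyGetD fx i 0
      let t := updateA st.1 j
      let r := PySem.Int.mod (st.2 + queryA t (j - 1)) 1000000007
      (t, r)) (tree1, 0)
  fin.2

-- ===== PORT B =====
def solve_alt (n : Int) (s : String) : Int :=
  let delta : PySem.Dict Char Int := ((PySem.Dict.empty.insert 'a' 1).insert 'b' 0).insert 'c' (-1)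
  let freq0 : List Int := List.replicate (2 * n + 1).toNat 0
  let freq1 := PySem.List.pySetD freq0 n 1
  let fin : List Int × Int × Int × Int := (PySem.List.pyRange 0 n 1).foldl
    (fun st i =>
      let freq := st.1; let v := st.2.1; let less := st.2.2.1; let res := st.2.2.2
      let d := PySem.Dict.getD delta (PySem.List.pyGetD s.toList i ' ') 0
      let vl : Int × Int :=
        if d = 1 then (v + 1, less + PySem.List.pyGetD freq (v + n) 0)
        else if d = -1 then (v - 1, less - PySem.List.pyGetD freq (v - 1 + n) 0)
        else (v, less)
      let res' := PySem.Int.mod (res + vl.2) 1000000007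
      let freq' := PySem.List.pySetD freq (vl.1 + n) (PySem.List.pyGetD freq (vl.1 + n) 0 + 1)
      (freq', vl.1, vl.2, res')) (freq1, 0, 0, 0)
  fin.2.2.2

-- ===== PRECONDITION & SPEC =====
-- Pre_ excludes exactly the inputs where A raises or diverges: negative n (IndexError on the
-- empty tree, or an infinite update loop at n = -1), n beyond len(s) (IndexError), and a
-- character other than 'a'/'b'/'c' among the first n (KeyError).
def Pre_solve (n : Int) (s : String) : Prop :=
  0 ≤ n ∧ n ≤ (s.toList.length : Int) ∧
    (s.toList.take n.toNat).all (fun c => c == 'a' || c == 'b' || c == 'c') = true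
instance (n : Int) (s : String) : Decidable (Pre_solve n s) := by unfold Pre_solve; infer_instance

def pvWitness_solve : Int × String := (3, "abc")

def Spec_solve (n : Int) (s : String) (out : Int) : Prop := out = solve_alt n s
instance (n : Int) (s : String) (out : Int) : Decidable (Spec_solve n s out) := by unfold Spec_solve; infer_instance

-- ===== CLAIM (what is proved, stated in full; the proofs are below) =====
def Claim_equal_solve : Prop := ∀ (n : Int) (s : String), Dom_solve n s → Pre_solve n s → Spec_solve n s (solve n s)

-- ===== LEMMAS AND PROOFS =====

-- lowest set bit of a positive Nat, as Python's  x & -x  computes it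
def nlb (x : Nat) : Nat := x - (x &&& (x - 1))

lemma lowbitI_eq (idx : Int) (h : 0 < idx) : lowbitI idx = (nlb idx.toNat : Int) := by
  unfold lowbitI nlb
  simp only [PySem.Int.band]
  rw [if_pos (by omega : (0:Int) ≤ idx), if_neg (by omega : ¬ (0:Int) ≤ -idx)]
  have h1 : (-(-idx) - 1).toNat = idx.toNat - 1 := by omega
  rw [h1]


lemma testBit_low (k m r i : Nat) (hi : i < k) :
    Nat.testBit (2^k * m + r) i = Nat.testBit r i := by
  rw [Nat.testBit_eq_decide_div_mod_eq, Nat.testBit_eq_decide_div_mod_eq]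
  have h2 : (2:Nat)^k = 2^i * (2 * 2^(k - i - 1)) := by
    rw [← pow_succ', ← pow_add]; congr 1; omega
  rw [h2, mul_assoc, Nat.mul_add_div (Nat.two_pow_pos i)]
  rw [mul_assoc 2]
  have h3 : ∀ t q : Nat, (2 * t + q) % 2 = q % 2 := by omega
  rw [h3]

lemma testBit_high (k m r i : Nat) (hr : r < 2^k) (hi : k ≤ i) :
    Nat.testBit (2^k * m + r) i = Nat.testBit m (i - k) := by
  have h1 : (2^k*m+r)/2^k = m := by
    rw [Nat.mul_add_div (Nat.two_pow_pos k), Nat.div_eq_of_lt hr]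
    omega
  calc Nat.testBit (2^k*m+r) i = Nat.testBit (2^k*m+r) ((i-k)+k) := by rw [Nat.sub_add_cancel hi]
    _ = Nat.testBit ((2^k*m+r) / 2^k) (i-k) := (Nat.testBit_div_two_pow _ _).symm
    _ = Nat.testBit m (i-k) := by rw [h1]

lemma land_pred (a c : Nat) : (2^(a+1)*c + 2^a) &&& (2^(a+1)*c + 2^a - 1) = 2^(a+1)*c := by
  have hpa : 0 < (2:Nat)^a := Nat.two_pow_pos a
  have hlt : (2:Nat)^a < 2^(a+1) := by rw [pow_succ]; omega
  have hx1 : 2^(a+1)*c + 2^a - 1 = 2^(a+1)*c + (2^a - 1) := by omega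
  apply Nat.eq_of_testBit_eq; intro i
  rw [Nat.testBit_land, hx1]
  rcases lt_trichotomy i a with h | h | h
  · rw [testBit_low (a+1) c _ i (by omega), testBit_low (a+1) c _ i (by omega)]
    rw [show (2:Nat)^(a+1)*c = 2^(a+1)*c + 0 by omega, testBit_low (a+1) c 0 i (by omega)]
    rw [Nat.testBit_two_pow]
    simp [show ¬ (a = i) by omega]
  · rw [testBit_low (a+1) c _ i (by omega), testBit_low (a+1) c _ i (by omega)]
    rw [show (2:Nat)^(a+1)*c = 2^(a+1)*c + 0 by omega, testBit_low (a+1) c 0 i (by omega)]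
    rw [show (2:Nat)^a - 1 = 2^i - 1 by rw [h], Nat.testBit_eq_false_of_lt (show 2^i - 1 < 2^i by have := Nat.two_pow_pos i; omega)]
    simp
  · rw [testBit_high (a+1) c _ i (by omega) (by omega), testBit_high (a+1) c _ i (by omega) (by omega)]
    rw [show (2:Nat)^(a+1)*c = 2^(a+1)*c + 0 by omega, testBit_high (a+1) c 0 i (by omega) (by omega)]
    exact Bool.and_self _


lemma nlb_decomp (x : Nat) (h : 1 ≤ x) :
    ∃ a m, x = 2 ^ (a + 1) * m + 2 ^ a ∧ nlb x = 2 ^ a := by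
  obtain ⟨k, m, hodd, hx⟩ := Nat.exists_eq_two_pow_mul_odd (n := x) (by omega)
  obtain ⟨c, hc⟩ := hodd
  refine ⟨k, c, ?_, ?_⟩
  · rw [hx, hc]; ring
  · have hx' : x = 2^(k+1)*c + 2^k := by rw [hx, hc]; ring
    rw [nlb, hx', land_pred, Nat.add_sub_cancel_left]

lemma nlb_pos (x : Nat) (h : 1 ≤ x) : 1 ≤ nlb x := by
  obtain ⟨a, m, _, hn⟩ := nlb_decomp x h
  rw [hn]; exact Nat.one_le_two_pow

lemma nlb_le (x : Nat) (h : 1 ≤ x) : nlb x ≤ x := by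
  obtain ⟨a, m, hx, hn⟩ := nlb_decomp x h
  omega

-- if j < i < j + nlb j then i - nlb i ≥ j

lemma nlb_B1 (j i : Nat) (hj : 1 ≤ j) (h1 : j < i) (h2 : i < j + nlb j) : j ≤ i - nlb i := by
  obtain ⟨a, m, hja, hjn⟩ := nlb_decomp j hj
  obtain ⟨b, c, hib, hin⟩ := nlb_decomp i (by omega)
  rw [hjn] at h2; rw [hin]
  have hdvdja : 2^a ∣ j := ⟨2*m+1, by rw [hja]; ring⟩
  have hdvdi : 2^b ∣ i := ⟨2*c+1, by rw [hib]; ring⟩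
  rcases Nat.lt_or_ge b a with hab | hab
  · have hdj : 2^b ∣ j := dvd_trans (pow_dvd_pow 2 (by omega)) hdvdja
    have hd : 2^b ∣ i - j := Nat.dvd_sub hdvdi hdj
    have := Nat.le_of_dvd (by omega) hd
    omega

  · have hdi : 2^a ∣ i := dvd_trans (pow_dvd_pow 2 hab) hdvdi
    have hd : 2^a ∣ i - j := Nat.dvd_sub hdi hdvdja
    have := Nat.le_of_dvd (by omega) hd
    omega
lemma nlb_B2 (j i : Nat) (hj : 1 ≤ j) (h1 : j + nlb j ≤ i) (h2 : i - nlb i < j + nlb j) :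
    i - nlb i < j := by
  obtain ⟨a, m, hja, hjn⟩ := nlb_decomp j hj
  obtain ⟨b, c, hib, hin⟩ := nlb_decomp i (by omega)
  rw [hjn] at h1 h2; rw [hin] at h2 ⊢
  by_contra hx
  have hpa : (2:Nat)^(a+1) = 2*2^a := by rw [pow_succ]; ring
  have hpb : (2:Nat)^(b+1) = 2*2^b := by rw [pow_succ]; ring
  have hxx : i - 2^b = 2^(b+1)*c := by omega
  rcases Nat.lt_or_ge b a with hab | hab
  · have hN : j + 2^a = 2^(a+1)*(m+1) := by rw [hja]; ring
    have hdN : 2^(b+1) ∣ j + 2^a := by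
      rw [hN]; exact Dvd.dvd.mul_right (pow_dvd_pow 2 (by omega)) (m+1)
    have hdx : 2^(b+1) ∣ i - 2^b := by
      rw [hxx]; exact dvd_mul_right _ c
    have hd : 2^(b+1) ∣ (j + 2^a) - (i - 2^b) := Nat.dvd_sub hdN hdx
    have := Nat.le_of_dvd (by omega) hd
    omega

  · have hdx : 2^(a+1) ∣ i - 2^b := by
      rw [hxx]; exact Dvd.dvd.mul_right (pow_dvd_pow 2 (by omega)) c
    have hdq : 2^(a+1) ∣ 2^(a+1)*m := dvd_mul_right _ m
    have hd : 2^(a+1) ∣ (i - 2^b) - 2^(a+1)*m := Nat.dvd_sub hdx hdq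
    have := Nat.le_of_dvd (by omega) hd
    omega
lemma getD_set_int (l : List Int) (J i : Nat) (v : Int) (hJ : J < l.length) :
    (l.set J v).getD i 0 = if i = J then v else l.getD i 0 := by
  simp only [List.getD_eq_getElem?_getD, List.getElem?_set]
  by_cases h : i = J
  · subst h; simp [hJ]
  · simp [Ne.symm h, h]

lemma length_updateGo (fuel : Nat) (a : List Int) (idx : Int) :
    (updateGo a idx fuel).length = a.length := by
  induction fuel generalizing a idx with
  | zero => rfl
  | succ fuel ih =>
    simp only [updateGo]
    split
    · rw [ih]; simp [PySem.List.length_pySetD]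
    · rfl

lemma updateGo_getD (fuel : Nat) (a : List Int) (idx : Int) (h1 : 1 ≤ idx)
    (hf : (a.length : Int) ≤ idx + fuel) : ∀ i : Nat, i < a.length →
    (updateGo a idx fuel).getD i 0 =
      a.getD i 0 + (if idx.toNat ≤ i ∧ i - nlb i < idx.toNat then 1 else 0) := by
  induction fuel generalizing a idx with
  | zero =>
    intro i hi
    simp only [updateGo]
    rw [if_neg (by omega)]
    simp
  | succ fuel ih =>
    intro i hi
    simp only [updateGo]
    by_cases hc : idx < PySem.List.len a
    · rw [if_pos hc]
      rw [PySem.List.len_eq] at hc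
      set J : Nat := idx.toNat with hJdef
      have hJ1 : 1 ≤ J := by omega
      have hJlt : J < a.length := by omega
      have hlow : lowbitI idx = (nlb J : Int) := lowbitI_eq idx (by omega)
      have hP1 : 1 ≤ nlb J := nlb_pos J hJ1
      have hset : PySem.List.pySetD a idx (PySem.List.pyGetD a idx 0 + 1)
          = a.set J (PySem.List.pyGetD a idx 0 + 1) := PySem.List.pySetD_of_nonneg _ _ (by omega)
      rw [hset, hlow]
      have hlen : (a.set J (PySem.List.pyGetD a idx 0 + 1)).length = a.length := by simp
      have hfl : ((a.set J (PySem.List.pyGetD a idx 0 + 1)).length : Int)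
          ≤ (idx + (nlb J : Int)) + fuel := by rw [hlen]; push_cast at hf ⊢; omega
      rw [ih _ _ (by omega) hfl i (by omega)]
      have htn : (idx + (nlb J : Int)).toNat = J + nlb J := by omega
      rw [htn, getD_set_int a J i _ hJlt]
      by_cases hiJ : i = J
      · have hni := nlb_pos i (by omega)
        rw [if_pos hiJ, if_neg (by omega), if_pos ⟨by omega, by omega⟩]
        have hgd : PySem.List.pyGetD a idx 0 = a.getD i 0 := by
          rw [hiJ, hJdef]
          conv_lhs => rw [← Int.toNat_of_nonneg (show (0:Int) ≤ idx by omega)]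
          rw [PySem.List.pyGetD_natCast]
        rw [hgd]; ring
      · rw [if_neg hiJ]
        congr 1
        apply if_congr _ rfl rfl
        constructor
        · rintro ⟨ha, hb⟩
          exact ⟨by omega, nlb_B2 J i hJ1 ha hb⟩
        · rintro ⟨ha, hb⟩
          have hJi : J < i := by omega
          constructor
          · by_contra hlt
            have := nlb_B1 J i hJ1 hJi (by omega)
            omega
          · omega
    · rw [if_neg hc]
      rw [PySem.List.len_eq] at hc
      rw [if_neg (by omega)]
      simp

lemma updateA_getD (a : List Int) (idx : Int) (h1 : 1 ≤ idx) (i : Nat) (hi : i < a.length) :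
    (updateA a idx).getD i 0 =
      a.getD i 0 + (if idx.toNat ≤ i ∧ i - nlb i < idx.toNat then 1 else 0) := by
  unfold updateA
  refine updateGo_getD _ _ _ h1 ?_ i hi
  rw [PySem.List.len_eq]
  omega

lemma length_updateA (a : List Int) (idx : Int) : (updateA a idx).length = a.length :=
  length_updateGo _ a _

-- the sum the Fenwick query loop computes, as a structural recursion on the Nat index
def qsum (T : List Int) (k : Nat) : Int :=
  if _h : k = 0 then 0 else T.getD k 0 + qsum T (k - nlb k)
termination_by k
decreasing_by have := nlb_pos k (by omega); omega

lemma queryGo_eq (fuel : Nat) (T : List Int) (t k : Int) (h0 : 0 ≤ k) (hf : k.toNat ≤ fuel) :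
    queryGo T t k fuel = t + qsum T k.toNat := by
  induction fuel generalizing t k with
  | zero =>
    have hk0 : k.toNat = 0 := by omega
    simp only [queryGo, hk0]
    rw [qsum]; simp
  | succ fuel ih =>
    simp only [queryGo]
    by_cases hc : 0 < k
    · rw [if_pos hc, lowbitI_eq k hc]
      have h1 := nlb_pos k.toNat (by omega)
      have h2 := nlb_le k.toNat (by omega)
      rw [ih _ _ (by omega) (by omega)]
      have hk' : (k - (nlb k.toNat : Int)).toNat = k.toNat - nlb k.toNat := by omega
      rw [hk']
      conv_rhs => rw [qsum]
      rw [dif_neg (by omega : ¬ k.toNat = 0)]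
      have hgd : PySem.List.pyGetD T k 0 = T.getD k.toNat 0 := by
        conv_lhs => rw [← Int.toNat_of_nonneg (le_of_lt hc)]
        rw [PySem.List.pyGetD_natCast]
      rw [hgd]; ring
    · rw [if_neg hc]
      have hk0 : k = 0 := by omega
      subst hk0
      rw [qsum]; simp

lemma queryA_eq (T : List Int) (k : Int) (h0 : 0 ≤ k) : queryA T k = qsum T k.toNat := by
  have := queryGo_eq k.toNat T 0 k h0 le_rfl
  simpa [queryA] using this

lemma qsum_zero_list (L k : Nat) : qsum (List.replicate L (0 : Int)) k = 0 := by
  induction k using Nat.strong_induction_on with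
  | _ k ih =>
    rw [qsum]
    by_cases hk : k = 0
    · simp [hk]
    · rw [dif_neg hk]
      have h1 := nlb_pos k (by omega)
      rw [ih (k - nlb k) (by omega)]
      have : (List.replicate L (0 : Int)).getD k 0 = 0 := by
        simp [List.getD_eq_getElem?_getD, List.getElem?_replicate]
        split <;> rfl
      rw [this]; ring

lemma qsum_update (T T' : List Int) (J : Nat) (hJ : 1 ≤ J)
    (_hlen : T'.length = T.length)
    (hget : ∀ i : Nat, i < T.length →
      T'.getD i 0 = T.getD i 0 + (if J ≤ i ∧ i - nlb i < J then 1 else 0)) :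
    ∀ k : Nat, k < T.length → qsum T' k = qsum T k + (if J ≤ k then 1 else 0) := by
  intro k
  induction k using Nat.strong_induction_on with
  | _ k ih =>
    intro hk
    by_cases hk0 : k = 0
    · subst hk0
      have e1 : qsum T' 0 = 0 := by simp [qsum]
      have e2 : qsum T 0 = 0 := by simp [qsum]
      rw [e1, e2, if_neg (by omega : ¬ J ≤ 0)]
      ring
    · have e1 : qsum T' k = T'.getD k 0 + qsum T' (k - nlb k) := by
        rw [qsum, dif_neg hk0]
      have e2 : qsum T k = T.getD k 0 + qsum T (k - nlb k) := by
        rw [qsum, dif_neg hk0]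
      have h1 := nlb_pos k (by omega)
      have h2 := nlb_le k (by omega)
      rw [e1, e2, ih (k - nlb k) (by omega) (by omega), hget k hk]
      split_ifs <;> omega


-- ---- abstraction layer for the main proof ----

def dval (c : Char) : Int := if c = 'a' then 1 else if c = 'c' then -1 else 0

def pref (cs : List Char) : Nat → Int
  | 0 => 0
  | t+1 => pref cs t + dval (cs.getD t ' ')

lemma dval_bound (c : Char) : -1 ≤ dval c ∧ dval c ≤ 1 := by
  unfold dval; split_ifs <;> omega

lemma pref_bound (cs : List Char) (t : Nat) : -(t:Int) ≤ pref cs t ∧ pref cs t ≤ t := by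
  induction t with
  | zero => simp [pref]
  | succ t ih =>
    have := dval_bound (cs.getD t ' ')
    simp only [pref]
    push_cast
    omega

lemma dict_eq_dval (c : Char) : PySem.Dict.getD charsDictA c 0 = dval c := by
  unfold charsDictA dval
  rw [PySem.Dict.getD_insert, PySem.Dict.getD_insert, PySem.Dict.getD_insert,
    PySem.Dict.getD_empty]
  split_ifs <;> simp_all

lemma countP_split {α : Type} (l : List α) (p q : α → Bool)
    (h : ∀ x ∈ l, ¬(p x = true ∧ q x = true)) :
    l.countP (fun x => p x || q x) = l.countP p + l.countP q := by
  induction l with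
  | nil => simp
  | cons a t ih =>
    rw [List.countP_cons, List.countP_cons, List.countP_cons,
      ih (fun x hx => h x (List.mem_cons_of_mem a hx))]
    have hd := h a (List.mem_cons_self)
    by_cases hp : p a = true <;> by_cases hq : q a = true
    · exact absurd ⟨hp, hq⟩ hd
    · simp [hp, hq]; omega
    · simp [hp, hq]; omega
    · simp [hp, hq]

lemma cnt_lt_add_eq (cs : List Char) (k : Nat) (x : Int) :
    (List.range (k+1)).countP (fun t => decide (pref cs t < x)) +
      (List.range (k+1)).countP (fun t => decide (pref cs t = x)) =
    (List.range (k+1)).countP (fun t => decide (pref cs t < x + 1)) := by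
  rw [← countP_split (List.range (k+1)) _ _ (by
    intro t _ ⟨h1, h2⟩
    simp only [decide_eq_true_eq] at h1 h2
    omega)]
  apply List.countP_congr
  intro t _
  simp only [Bool.or_eq_true, decide_eq_true_eq]
  omega

lemma countP_range_one (p : Nat → Bool) : (List.range 1).countP p = if p 0 then 1 else 0 := by
  simp [List.range_succ]

lemma countP_range_succ (p : Nat → Bool) (k : Nat) :
    (List.range (k+1)).countP p = (List.range k).countP p + (if p k then 1 else 0) := by
  rw [List.range_succ, List.countP_append]
  simp [List.countP_cons]

def fxA (n : Int) (s : String) : List Int :=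
  (List.range n.toNat).map (fun t => pref s.toList (t+1))

def gA (n : Int) (fx : List Int) (st : List Int × Int) (t : Nat) : List Int × Int :=
  let j := n + 1 + PySem.List.pyGetD fx (t : Int) 0
  let tr := updateA st.1 j
  (tr, PySem.Int.mod (st.2 + queryA tr (j - 1)) 1000000007)

def SA (n : Int) (s : String) (k : Nat) : List Int × Int :=
  (List.range k).foldl (gA n (fxA n s)) (updateA (List.replicate (2*n+4).toNat 0) (n+1), 0)

def gB (n : Int) (s : String) (st : List Int × Int × Int × Int) (t : Nat) :
    List Int × Int × Int × Int :=
  let d := dval (PySem.List.pyGetD s.toList (t : Int) ' ')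
  let vl : Int × Int :=
    if d = 1 then (st.2.1 + 1, st.2.2.1 + PySem.List.pyGetD st.1 (st.2.1 + n) 0)
    else if d = -1 then (st.2.1 - 1, st.2.2.1 - PySem.List.pyGetD st.1 (st.2.1 - 1 + n) 0)
    else (st.2.1, st.2.2.1)
  (PySem.List.pySetD st.1 (vl.1 + n) (PySem.List.pyGetD st.1 (vl.1 + n) 0 + 1),
   vl.1, vl.2, PySem.Int.mod (st.2.2.2 + vl.2) 1000000007)

def SB (n : Int) (s : String) (k : Nat) : List Int × Int × Int × Int :=
  (List.range k).foldl (gB n s)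
    (PySem.List.pySetD (List.replicate (2*n+1).toNat 0) n 1, 0, 0, 0)

lemma SA_succ (n : Int) (s : String) (k : Nat) :
    SA n s (k+1) = gA n (fxA n s) (SA n s k) k := by
  unfold SA; rw [List.range_succ, List.foldl_append]; rfl

lemma SB_succ (n : Int) (s : String) (k : Nat) :
    SB n s (k+1) = gB n s (SB n s k) k := by
  unfold SB; rw [List.range_succ, List.foldl_append]; rfl

lemma fx_fold_aux (s : String) (N : Nat) : ∀ k, k ≤ N →
    (List.range k).foldl (fun fx (t : Nat) => PySem.List.pySetD fx (t : Int)
        (PySem.List.pyGetD fx ((t : Int) - 1) 0 +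
          dval (PySem.List.pyGetD s.toList (t : Int) ' ')))
      (List.replicate N 0) =
    (List.range k).map (fun t => pref s.toList (t+1)) ++ List.replicate (N - k) (0 : Int) := by
  intro k
  induction k with
  | zero => simp
  | succ k ih =>
    intro hk
    rw [List.range_succ, List.foldl_append, List.map_append, ih (by omega)]
    simp only [List.foldl_cons, List.foldl_nil]
    have hget : PySem.List.pyGetD
        ((List.range k).map (fun t => pref s.toList (t+1)) ++ List.replicate (N - k) (0:Int))
        ((k : Int) - 1) 0 = pref s.toList k := by
      rcases Nat.eq_zero_or_pos k with hk0 | hk0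
      · subst hk0
        have hrep : List.replicate (N - 0) (0:Int) = List.replicate (N-1) 0 ++ [0] := by
          have : N - 0 = (N-1) + 1 := by omega
          rw [this, List.replicate_succ']
        simp only [List.range_zero, List.map_nil, List.nil_append, hrep]
        rw [show ((0:Nat):Int) - 1 = -1 by simp]
        rw [PySem.List.pyGetD_neg_one_append_singleton]
        rfl
      · rw [show ((k:Nat):Int) - 1 = ((k - 1 : Nat) : Int) by omega,
          PySem.List.pyGetD_natCast]
        rw [List.getD_append _ _ _ _ (by simp; omega)]
        rw [PySem.List.getD_map_range _ _ _ _ (by omega)]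
        congr 1
        omega
    rw [hget, PySem.List.pySetD_natCast]
    have hlenm : ((List.range k).map (fun t => pref s.toList (t+1))).length = k := by simp
    rw [List.set_append, if_neg (by omega)]
    have hrep2 : List.replicate (N - k) (0:Int) = 0 :: List.replicate (N - (k+1)) 0 := by
      have : N - k = (N - (k+1)) + 1 := by omega
      rw [this, List.replicate_succ]
    rw [hrep2, hlenm]
    simp only [Nat.sub_self, List.set_cons_zero]
    rw [show pref s.toList k + dval (PySem.List.pyGetD s.toList (k:Int) ' ')
        = pref s.toList (k+1) by
      simp only [pref, PySem.List.pyGetD_natCast]]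
    simp

lemma solve_eq (n : Int) (s : String) : solve n s = (SA n s n.toNat).2 := by
  unfold solve SA gA fxA
  dsimp only
  rw [PySem.List.pyRange_zero]
  rw [List.foldl_map, List.foldl_map]
  have hfun : (fun (fx : List Int) (t : Nat) => PySem.List.pySetD fx (t : Int)
        (PySem.List.pyGetD fx ((t : Int) - 1) 0 +
          PySem.Dict.getD charsDictA (PySem.List.pyGetD s.toList (t : Int) ' ') 0))
      = (fun fx (t : Nat) => PySem.List.pySetD fx (t : Int)
        (PySem.List.pyGetD fx ((t : Int) - 1) 0 +
          dval (PySem.List.pyGetD s.toList (t : Int) ' '))) := by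
    funext fx t
    rw [dict_eq_dval]
  rw [hfun, fx_fold_aux s n.toNat n.toNat le_rfl]
  simp

lemma solve_alt_eq (n : Int) (s : String) : solve_alt n s = (SB n s n.toNat).2.2.2 := by
  unfold solve_alt SB gB
  dsimp only
  rw [PySem.List.pyRange_zero, List.foldl_map]
  refine congrArg (fun z : List Int × Int × Int × Int => z.2.2.2) ?_
  apply PySem.List.foldl_congr_mem
  intro acc t _
  have hd : (((PySem.Dict.empty.insert 'a' 1).insert 'b' 0).insert 'c' (-1)).getD
      (PySem.List.pyGetD s.toList (t : Int) ' ') 0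
      = dval (PySem.List.pyGetD s.toList (t : Int) ' ') := dict_eq_dval _
  rw [hd]


lemma main_inv (n : Int) (s : String) (hn : 0 ≤ n) : ∀ k, k ≤ n.toNat →
    ((SA n s k).1.length = (2*n+4).toNat) ∧
    (∀ m : Nat, m < (2*n+4).toNat → qsum (SA n s k).1 m
        = ((List.range (k+1)).countP (fun t => decide (n + 1 + pref s.toList t ≤ (m:Int))) : Int)) ∧
    ((SB n s k).1.length = (2*n+1).toNat) ∧
    (∀ x : Nat, x < (2*n+1).toNat → (SB n s k).1.getD x 0
        = ((List.range (k+1)).countP (fun t => decide (pref s.toList t = (x:Int) - n)) : Int)) ∧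
    ((SB n s k).2.1 = pref s.toList k) ∧
    ((SB n s k).2.2.1
        = ((List.range (k+1)).countP (fun t => decide (pref s.toList t < pref s.toList k)) : Int)) ∧
    ((SA n s k).2 = (SB n s k).2.2.2) := by
  intro k
  induction k with
  | zero =>
    intro _
    have hSA1 : (SA n s 0).1 = updateA (List.replicate (2*n+4).toNat 0) (n+1) := rfl
    have hSB1 : (SB n s 0).1 = PySem.List.pySetD (List.replicate (2*n+1).toNat 0) n 1 := rfl
    refine ⟨?_, ?_, ?_, ?_, rfl, ?_, rfl⟩
    · rw [hSA1, length_updateA]; simp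
    · intro m hm
      rw [hSA1]
      have hq := qsum_update (List.replicate (2*n+4).toNat 0) _ (n+1).toNat (by omega)
        (length_updateA _ _)
        (fun i hi => updateA_getD _ _ (by omega) i hi)
        m (by simpa using hm)
      rw [hq, qsum_zero_list, countP_range_one]
      simp only [pref, decide_eq_true_eq]
      split_ifs <;> push_cast <;> omega
    · rw [hSB1, PySem.List.length_pySetD]; simp
    · intro x hx
      rw [hSB1, PySem.List.pySetD_of_nonneg _ _ hn,
        getD_set_int _ _ _ _ (by simp; omega), countP_range_one]
      simp only [pref, decide_eq_true_eq]
      by_cases h1 : x = n.toNat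
      · rw [if_pos h1, if_pos (by omega)]
        norm_num
      · rw [if_neg h1, if_neg (by omega), List.getD_replicate _ (by simpa using hx)]
        norm_num
    · have : (SB n s 0).2.2.1 = 0 := rfl
      rw [this, countP_range_one]
      simp
  | succ k ih =>
    intro hk1
    obtain ⟨hAl, hAq, hBl, hBf, hBv, hBless, hres⟩ := ih (by omega)
    have hpb1 := pref_bound s.toList k
    have hpb2 := pref_bound s.toList (k+1)
    push_cast at hpb1 hpb2
    have hkN : (k:Int) + 1 ≤ n := by omega
    have hc : PySem.List.pyGetD s.toList (k:Int) ' ' = s.toList.getD k ' ' := by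
      rw [PySem.List.pyGetD_natCast]
    have hps : pref s.toList (k+1) = pref s.toList k + dval (s.toList.getD k ' ') := rfl
    have hd3 : dval (s.toList.getD k ' ') = 1 ∨ dval (s.toList.getD k ' ') = -1 ∨
        dval (s.toList.getD k ' ') = 0 := by
      unfold dval; split_ifs <;> simp
    have hfx : PySem.List.pyGetD (fxA n s) (k:Int) 0 = pref s.toList (k+1) := by
      rw [PySem.List.pyGetD_natCast]
      unfold fxA
      rw [PySem.List.getD_map_range _ _ _ _ (by omega)]
    have hjlo : 1 ≤ n + 1 + pref s.toList (k+1) := by omega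
    have hjhi : n + 1 + pref s.toList (k+1) ≤ 2*n+1 := by omega
    rw [SA_succ, SB_succ]
    -- A side
    have hTA' : (gA n (fxA n s) (SA n s k) k).1
        = updateA (SA n s k).1 (n + 1 + pref s.toList (k+1)) := by
      dsimp only [gA]; rw [hfx]
    have hRA' : (gA n (fxA n s) (SA n s k) k).2
        = PySem.Int.mod ((SA n s k).2 +
            queryA (updateA (SA n s k).1 (n + 1 + pref s.toList (k+1)))
              (n + 1 + pref s.toList (k+1) - 1)) 1000000007 := by
      dsimp only [gA]; rw [hfx]
    have hAl' : (updateA (SA n s k).1 (n+1+pref s.toList (k+1))).length = (2*n+4).toNat := by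
      rw [length_updateA, hAl]
    have hAq' : ∀ m : Nat, m < (2*n+4).toNat →
        qsum (updateA (SA n s k).1 (n+1+pref s.toList (k+1))) m
        = ((List.range (k+1+1)).countP
            (fun t => decide (n + 1 + pref s.toList t ≤ (m:Int))) : Int) := by
      intro m hm
      have hq := qsum_update (SA n s k).1 _ (n+1+pref s.toList (k+1)).toNat (by omega)
        (length_updateA _ _)
        (fun i hi => updateA_getD _ _ (by omega) i hi)
        m (by rw [hAl]; exact hm)
      rw [hq, hAq m hm]
      conv_rhs => rw [countP_range_succ]
      simp only [decide_eq_true_eq]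
      split_ifs <;> push_cast <;> omega
    have hQ : queryA (updateA (SA n s k).1 (n+1+pref s.toList (k+1)))
        (n + 1 + pref s.toList (k+1) - 1)
        = ((List.range (k+1+1)).countP
            (fun t => decide (pref s.toList t < pref s.toList (k+1))) : Int) := by
      rw [queryA_eq _ _ (by omega)]
      rw [hAq' (n + 1 + pref s.toList (k+1) - 1).toNat (by omega)]
      congr 1
      apply List.countP_congr
      intro t _
      simp only [decide_eq_true_eq]
      omega
    -- B side: uniform shape of the gB output
    have huni1 : (gB n s (SB n s k) k).1
        = PySem.List.pySetD (SB n s k).1 ((gB n s (SB n s k) k).2.1 + n)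
            (PySem.List.pyGetD (SB n s k).1 ((gB n s (SB n s k) k).2.1 + n) 0 + 1) := rfl
    have huni2 : (gB n s (SB n s k) k).2.2.2
        = PySem.Int.mod ((SB n s k).2.2.2 + (gB n s (SB n s k) k).2.2.1) 1000000007 := rfl
    have hext : ((List.range (k+1+1)).countP
          (fun t => decide (pref s.toList t < pref s.toList (k+1))) : Nat)
        = (List.range (k+1)).countP
            (fun t => decide (pref s.toList t < pref s.toList (k+1))) := by
      rw [countP_range_succ]; simp
    -- case-dependent: new v and new less
    have hkey : (gB n s (SB n s k) k).2.1 = pref s.toList (k+1) ∧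
        (gB n s (SB n s k) k).2.2.1
          = ((List.range (k+1+1)).countP
              (fun t => decide (pref s.toList t < pref s.toList (k+1))) : Int) := by
      rcases hd3 with hd | hd | hd
      · have hvl1 : (gB n s (SB n s k) k).2.1 = (SB n s k).2.1 + 1 := by
          dsimp only [gB]; rw [hc, hd]; norm_num
        have hvl2 : (gB n s (SB n s k) k).2.2.1
            = (SB n s k).2.2.1 + PySem.List.pyGetD (SB n s k).1 ((SB n s k).2.1 + n) 0 := by
          dsimp only [gB]; rw [hc, hd]; norm_num
        have hgv : PySem.List.pyGetD (SB n s k).1 ((SB n s k).2.1 + n) 0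
            = ((List.range (k+1)).countP
                (fun t => decide (pref s.toList t = pref s.toList k)) : Int) := by
          rw [hBv]
          conv_lhs => rw [← Int.toNat_of_nonneg (show (0:Int) ≤ pref s.toList k + n by omega)]
          rw [PySem.List.pyGetD_natCast, hBf _ (by omega)]
          congr 1
          apply List.countP_congr
          intro t _
          simp only [decide_eq_true_eq]
          omega
        constructor
        · rw [hvl1, hBv, hps, hd]
        · rw [hvl2, hgv, hBless, hext]
          have hsplit := cnt_lt_add_eq s.toList k (pref s.toList k)
          have hp1 : pref s.toList (k+1) = pref s.toList k + 1 := by rw [hps, hd]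
          rw [hp1]
          push_cast [← hsplit]
          ring
      · have hvl1 : (gB n s (SB n s k) k).2.1 = (SB n s k).2.1 - 1 := by
          dsimp only [gB]; rw [hc, hd]; norm_num
        have hvl2 : (gB n s (SB n s k) k).2.2.1
            = (SB n s k).2.2.1 - PySem.List.pyGetD (SB n s k).1 ((SB n s k).2.1 - 1 + n) 0 := by
          dsimp only [gB]; rw [hc, hd]; norm_num
        have hgv : PySem.List.pyGetD (SB n s k).1 ((SB n s k).2.1 - 1 + n) 0
            = ((List.range (k+1)).countP
                (fun t => decide (pref s.toList t = pref s.toList k - 1)) : Int) := by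
          rw [hBv]
          conv_lhs => rw [← Int.toNat_of_nonneg
            (show (0:Int) ≤ pref s.toList k - 1 + n by rw [show pref s.toList k - 1
              = pref s.toList (k+1) by rw [hps, hd]; ring]; omega)]
          rw [PySem.List.pyGetD_natCast, hBf _ (by omega)]
          congr 1
          apply List.countP_congr
          intro t _
          simp only [decide_eq_true_eq]
          omega
        constructor
        · rw [hvl1, hBv, hps, hd]; ring
        · rw [hvl2, hgv, hBless, hext]
          have hsplit := cnt_lt_add_eq s.toList k (pref s.toList k - 1)
          have hp1 : pref s.toList (k+1) = pref s.toList k - 1 := by rw [hps, hd]; ring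
          rw [hp1]
          have : pref s.toList k - 1 + 1 = pref s.toList k := by ring
          rw [this] at hsplit
          push_cast [← hsplit]
          ring
      · have hvl1 : (gB n s (SB n s k) k).2.1 = (SB n s k).2.1 := by
          dsimp only [gB]; rw [hc, hd]; norm_num
        have hvl2 : (gB n s (SB n s k) k).2.2.1 = (SB n s k).2.2.1 := by
          dsimp only [gB]; rw [hc, hd]; norm_num
        have hp1 : pref s.toList (k+1) = pref s.toList k := by rw [hps, hd]; ring
        constructor
        · rw [hvl1, hBv, hp1]
        · rw [hvl2, hBless, hext, hp1]
    obtain ⟨hv', hless'⟩ := hkey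
    have hidxlt : ((pref s.toList (k+1) + n).toNat) < (SB n s k).1.length := by
      rw [hBl]; omega
    have hgQ : PySem.List.pyGetD (SB n s k).1 (pref s.toList (k+1) + n) 0
        = (SB n s k).1.getD (pref s.toList (k+1) + n).toNat 0 := by
      conv_lhs => rw [← Int.toNat_of_nonneg (show (0:Int) ≤ pref s.toList (k+1) + n by omega)]
      rw [PySem.List.pyGetD_natCast]
    refine ⟨?_, ?_, ?_, ?_, hv', hless', ?_⟩
    · rw [hTA']; exact hAl'
    · intro m hm; rw [hTA']; exact hAq' m hm
    · rw [huni1, PySem.List.length_pySetD, hBl]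
    · intro x hx
      rw [huni1, hv', PySem.List.pySetD_of_nonneg _ _ (by omega),
        getD_set_int _ _ _ _ hidxlt, hgQ, countP_range_succ]
      by_cases hxi : x = (pref s.toList (k+1) + n).toNat
      · rw [if_pos hxi, hxi, hBf _ (by omega)]
        simp only [decide_eq_true_eq]
        rw [if_pos (by omega)]
        have : ((pref s.toList (k+1) + n).toNat : Int) = pref s.toList (k+1) + n := by omega
        push_cast [this]
        ring
      · rw [if_neg hxi, hBf x hx]
        simp only [decide_eq_true_eq]
        rw [if_neg (by omega)]
        push_cast
        ring
    · rw [hRA', huni2, hres, hQ, hless']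

-- ===== VERDICT (by name: the statement is the Claim_ definition above) =====
theorem solve_spec : Claim_equal_solve := by
  unfold Claim_equal_solve
  intro n s _ hpre
  unfold Spec_solve
  rw [solve_eq, solve_alt_eq]
  exact (main_inv n s hpre.1 n.toNat le_rfl).2.2.2.2.2.2
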